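-- pv_equiv track=rewrite | github.com/gayverjr/pyemap | pyemap/common_paths/protein_group.py | nodes_and_edges_from_string
-- ===== SOURCE A (Python) =====
-- def nodes_and_edges_from_string(graph_str, edge_thresholds, residue_categories):
--     ''' Returns all possible combinations of nodes and edges based on graph string and edge thresholds and residue categories.
--
--     Parameters
--     ----------
--     graph_str: str
--         Specification of graph
--     edge_threshodls: list of float
--         Edge thresholds
--     residue_categories: list of str
--         List of 1 letter amino acid codes
--
--     '''
--     graph_str = graph_str.replace(" ", "")
--     graph_str = list(graph_str)
--     node_list = []
--     idx = 0
--     while idx < len(graph_str):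
--         node_list.append(str(graph_str[idx]))
--         idx += 1
--     l1 = []
--     for i in range(0, len(edge_thresholds)):
--         l1.append(i + 2)
--     from itertools import product
--     indices = [i for i, x in enumerate(node_list) if x == "*"]
--     if len(indices) == 0:
--         node_combs = [node_list]
--     else:
--         node_combs = []
--         wildcard_combs = list(product(residue_categories, repeat=len(indices)))
--         for comb in wildcard_combs:
--             for i, idx in enumerate(indices):
--                 node_list[idx] = comb[i]
--             node_combs.append(node_list.copy())
--     edge_combs = list(product(l1, repeat=len(node_list) - 1))
--     if len(edge_combs) == 0:
--         edge_combs = [tuple([2 for x in range(0,len(graph_str)-1)])]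
--     return node_combs, edge_combs
-- ===== SOURCE B (Python) =====
-- from itertools import product
--
--
-- def nodes_and_edges_from_string(graph_str, edge_thresholds, residue_categories):
--     chars = list(graph_str.replace(" ", ""))
--     choices = [residue_categories if c == "*" else [c] for c in chars]
--     node_combs = [list(p) for p in product(*choices)]
--     edge_opts = [i + 2 for i in range(len(edge_thresholds))]
--     edge_combs = list(product(edge_opts, repeat=len(chars) - 1)) \
--         or [tuple([2] * (len(chars) - 1))]
--     return node_combs, edge_combs
-- ===== Notes on version B (the rewrite author's own statement) =====
-- stated objective: simpler
-- what changed: B replaces A's wildcard-index hunt plus repeated in-place splicing of a mutated template list by a per-position choice table (singleton or residue_categories per character) and one cartesian product over it; the edge half is a comprehension with an or-fallback instead of explicit loops.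
import Mathlib
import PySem

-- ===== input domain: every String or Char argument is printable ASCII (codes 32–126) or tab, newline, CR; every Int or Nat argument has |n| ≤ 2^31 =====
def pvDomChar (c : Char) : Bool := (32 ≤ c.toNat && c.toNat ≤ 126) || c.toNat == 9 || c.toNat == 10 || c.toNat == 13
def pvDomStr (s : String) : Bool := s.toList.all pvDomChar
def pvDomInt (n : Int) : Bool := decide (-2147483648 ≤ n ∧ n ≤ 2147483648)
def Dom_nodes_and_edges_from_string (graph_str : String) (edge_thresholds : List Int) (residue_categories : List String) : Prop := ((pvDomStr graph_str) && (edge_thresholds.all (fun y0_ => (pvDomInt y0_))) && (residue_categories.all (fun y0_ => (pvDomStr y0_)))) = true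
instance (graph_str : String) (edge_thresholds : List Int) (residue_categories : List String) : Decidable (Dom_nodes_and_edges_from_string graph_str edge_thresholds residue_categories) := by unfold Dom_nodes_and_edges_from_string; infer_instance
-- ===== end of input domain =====

-- B replaces A's wildcard-index hunt and in-place splicing of a mutated template by a per-position
-- choice table and one cartesian product (objective: simpler, same cost). Return values only;
-- neither implementation mutates its arguments.

-- itertools.product(xs, repeat := n): tuples as lists, leftmost coordinate varies slowest
-- (shared port of the library call both Source A and Source B make).
def pyProductRepeat {α : Type} (xs : List α) : Nat → List (List α)
  | 0 => [[]]
  | n + 1 => xs.flatMap (fun x => (pyProductRepeat xs n).map (x :: ·))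

-- ===== PORT A =====

-- the while loop: node_list.append(str(graph_str[idx])); idx += 1
def pvA_whileNodes (chars : List Char) (idx : Nat) : List String :=
  if h : idx < chars.length then String.ofList [chars[idx]] :: pvA_whileNodes chars (idx + 1) else []
termination_by chars.length - idx

-- the inner for loop "for i, idx in enumerate(indices): node_list[idx] = comb[i]" pairs each index
-- with the comb entry at its own position, i.e. a fold over indices.zip comb (exact: len(comb) = len(indices)).
def pvA_splice (l : List String) (indices : List Nat) (comb : List String) : List String :=
  (indices.zip comb).foldl (fun acc iv => acc.set iv.1 iv.2) l

def nodes_and_edges_from_string (graph_str : String) (edge_thresholds : List Int) (residue_categories : List String) : List (List String) × List (List Int) :=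
  let chars := PySem.Chars.replace graph_str.toList [' '] []     -- graph_str.replace(" ", ""); list(...)
  let node_list := pvA_whileNodes chars 0
  let l1 : List Int := (PySem.List.pyRange 0 edge_thresholds.length 1).foldl (fun acc i => acc ++ [i + 2]) []
  -- enumerate positions are nonnegative, so .toNat is exact
  let indices : List Nat := ((PySem.List.enumerate node_list 0).filter (fun p => p.2 == "*")).map (fun p => p.1.toNat)
  let node_combs : List (List String) :=
    if indices.length = 0 then [node_list]
    else
      let wildcard_combs := pyProductRepeat residue_categories indices.length
      (wildcard_combs.foldl
        (fun (st : List String × List (List String)) comb =>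
          let nl := pvA_splice st.1 indices comb
          (nl, st.2 ++ [nl]))
        (node_list, [])).2
  let edge_combs := pyProductRepeat l1 (node_list.length - 1)
  let edge_combs :=
    if edge_combs.length = 0 then
      [(PySem.List.pyRange 0 ((chars.length : Int) - 1) 1).map (fun _ => (2 : Int))]
    else edge_combs
  (node_combs, edge_combs)

-- ===== PORT B =====

-- product(*choices): the cartesian product of a list of choice lists
def pvB_cart (choices : List (List String)) : List (List String) :=
  match choices with
  | [] => [[]]
  | c :: cs => c.flatMap (fun x => (pvB_cart cs).map (x :: ·))

def nodes_and_edges_from_string_alt (graph_str : String) (edge_thresholds : List Int) (residue_categories : List String) : List (List String) × List (List Int) :=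
  let chars := PySem.Chars.replace graph_str.toList [' '] []
  let choices := chars.map (fun c => if c == '*' then residue_categories else [String.ofList [c]])
  let node_combs := pvB_cart choices
  let edge_opts : List Int := (List.range edge_thresholds.length).map (fun i : Nat => (i : Int) + 2)
  let ec := pyProductRepeat edge_opts (chars.length - 1)
  let edge_combs := if ec.isEmpty then [List.replicate (chars.length - 1) (2 : Int)] else ec
  (node_combs, edge_combs)

-- ===== PRECONDITION & SPEC =====
-- Pre_ excludes exactly the inputs where A raises: when graph_str has no non-space character,
-- product(l1, repeat=-1) raises ValueError ("repeat argument cannot be negative"); Source B raises there too.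
def Pre_nodes_and_edges_from_string (graph_str : String) (edge_thresholds : List Int) (residue_categories : List String) : Prop :=
  PySem.Chars.replace graph_str.toList [' '] [] ≠ []
instance (graph_str : String) (edge_thresholds : List Int) (residue_categories : List String) : Decidable (Pre_nodes_and_edges_from_string graph_str edge_thresholds residue_categories) := by unfold Pre_nodes_and_edges_from_string; infer_instance

def pvWitness_nodes_and_edges_from_string : String × List Int × List String := ("A*B", [3, 7], ["X", "Y"])

def Spec_nodes_and_edges_from_string (graph_str : String) (edge_thresholds : List Int) (residue_categories : List String) (out : List (List String) × List (List Int)) : Prop := out = nodes_and_edges_from_string_alt graph_str edge_thresholds residue_categories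
instance (graph_str : String) (edge_thresholds : List Int) (residue_categories : List String) (out : List (List String) × List (List Int)) : Decidable (Spec_nodes_and_edges_from_string graph_str edge_thresholds residue_categories out) := by unfold Spec_nodes_and_edges_from_string; infer_instance

-- ===== CLAIM (what is proved, stated in full; the proofs are below) =====
def Claim_equal_nodes_and_edges_from_string : Prop := ∀ (graph_str : String) (edge_thresholds : List Int) (residue_categories : List String), Dom_nodes_and_edges_from_string graph_str edge_thresholds residue_categories → Pre_nodes_and_edges_from_string graph_str edge_thresholds residue_categories → Spec_nodes_and_edges_from_string graph_str edge_thresholds residue_categories (nodes_and_edges_from_string graph_str edge_thresholds residue_categories)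

-- ===== LEMMAS AND PROOFS =====

-- the while loop builds the list of one-character strings
theorem pvA_whileNodes_eq (chars : List Char) (idx : Nat) :
    pvA_whileNodes chars idx = (chars.drop idx).map (fun c => String.ofList [c]) := by
  rw [pvA_whileNodes]
  split
  · rename_i h
    rw [pvA_whileNodes_eq chars (idx + 1), List.drop_eq_getElem_cons h, List.map_cons]
  · rename_i h
    rw [List.drop_eq_nil_of_le (by omega), List.map_nil]
termination_by chars.length - idx

-- wildcard positions, structurally
def pvWpos : List String → List Nat
  | [] => []
  | x :: t => if x == "*" then 0 :: (pvWpos t).map (· + 1) else (pvWpos t).map (· + 1)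

-- A's enumerate-filter index hunt computes pvWpos (shifted by the start value)
theorem pvIndices_eq (xs : List String) (s : Nat) :
    ((PySem.List.enumerate xs (s : Int)).filter (fun p => p.2 == "*")).map (fun p => p.1.toNat)
      = (pvWpos xs).map (s + ·) := by
  induction xs generalizing s with
  | nil => simp [PySem.List.enumerate_nil, pvWpos]
  | cons x t ih =>
    rw [PySem.List.enumerate_cons, pvWpos]
    have h1 : ((s : Int) + 1) = ((s + 1 : Nat) : Int) := by push_cast; ring
    rw [h1]
    by_cases hx : x = "*"
    · simp only [List.filter_cons, hx, beq_self_eq_true, if_pos, List.map_cons, ih (s + 1),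
        List.map_map, Int.toNat_natCast, Function.comp_def]
      congr 1
      apply List.map_congr_left
      intro a _; omega
    · have hx' : (x == "*") = false := by simp [hx]
      simp only [List.filter_cons, hx', Bool.false_eq_true, if_false, ih (s + 1),
        List.map_map, Function.comp_def]
      apply List.map_congr_left; intro a _; omega

theorem pvSplice_nil (l : List String) (comb : List String) : pvA_splice l [] comb = l := by
  simp [pvA_splice]

theorem pvSplice_shift (t : List String) (ps : List Nat) (comb : List String) (a : String) :
    pvA_splice (a :: t) (ps.map (· + 1)) comb = a :: pvA_splice t ps comb := by
  induction ps generalizing t comb with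
  | nil => simp [pvA_splice]
  | cons p ps' ih =>
    cases comb with
    | nil => simp [pvA_splice]
    | cons v c' =>
      simp only [pvA_splice, List.map_cons, List.zip_cons_cons, List.foldl_cons, List.set]
      exact ih (t.set p v) c'

theorem pvSplice_zero (t : List String) (ps : List Nat) (a v : String) (c : List String) :
    pvA_splice (a :: t) (0 :: ps.map (· + 1)) (v :: c) = v :: pvA_splice t ps c := by
  simp only [pvA_splice, List.zip_cons_cons, List.foldl_cons, List.set]
  exact pvSplice_shift t ps c v

-- splicing twice at the same wildcard positions = splicing once (A's loop state is immaterial)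
theorem pvSplice_double (nl : List String) : ∀ (x c0 c : List String),
    x.length = nl.length → c0.length = (pvWpos nl).length → c.length = (pvWpos nl).length →
    pvA_splice (pvA_splice x (pvWpos nl) c0) (pvWpos nl) c = pvA_splice x (pvWpos nl) c := by
  induction nl with
  | nil => intro x c0 c _ _ _; simp [pvWpos, pvSplice_nil]
  | cons s t ih =>
    intro x c0 c hx hc0 hc
    cases x with
    | nil => simp at hx
    | cons y x' =>
      by_cases hs : s == "*"
      · simp only [pvWpos, hs, if_pos] at hc0 hc ⊢
        cases c0 with
        | nil => simp at hc0
        | cons v0 c0' =>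
          cases c with
          | nil => simp at hc
          | cons v c' =>
            rw [pvSplice_zero, pvSplice_zero, pvSplice_zero]
            simp only [List.length_cons, List.length_map] at hc0 hc
            congr 1
            exact ih x' c0' c' (by simpa using hx) (by omega) (by omega)
      · have hs' : (s == "*") = false := by simpa using hs
        simp only [pvWpos, hs', Bool.false_eq_true, if_false] at hc0 hc ⊢
        rw [pvSplice_shift x' (pvWpos t) c0 y, pvSplice_shift _ (pvWpos t) c y,
            pvSplice_shift x' (pvWpos t) c y]
        simp only [List.length_map] at hc0 hc
        congr 1
        exact ih x' c0 c (by simpa using hx) hc0 hc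

theorem pvProdRepeat_length {α : Type} (xs : List α) (n : Nat) :
    ∀ c ∈ pyProductRepeat xs n, c.length = n := by
  induction n with
  | zero => intro c hc; simp [pyProductRepeat] at hc; simp [hc]
  | succ n ih =>
    intro c hc
    simp only [pyProductRepeat, List.mem_flatMap, List.mem_map] at hc
    obtain ⟨x, _, cb, hcb, rfl⟩ := hc
    simp [ih cb hcb]

theorem pvKey (c : Char) : (String.ofList [c] == "*") = (c == '*') := by
  cases h : c == '*'
  · simp_all [String.ext_iff]
  · simp_all

-- the splice image of the repeat-product is B's cartesian product over the choice table
theorem pvMain (cats : List String) : ∀ (chars : List Char),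
    (pyProductRepeat cats (pvWpos (chars.map (fun c => String.ofList [c]))).length).map
        (fun comb => pvA_splice (chars.map (fun c => String.ofList [c]))
          (pvWpos (chars.map (fun c => String.ofList [c]))) comb)
      = pvB_cart (chars.map (fun c => if c == '*' then cats else [String.ofList [c]])) := by
  intro chars
  induction chars with
  | nil => simp [pvWpos, pyProductRepeat, pvB_cart, pvSplice_nil]
  | cons c t ih =>
    by_cases hc : c == '*'
    · simp only [List.map_cons, pvWpos, pvKey, hc, if_pos, List.length_cons, List.length_map,
        pyProductRepeat, pvB_cart, List.map_flatMap]
      apply List.flatMap_congr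
      intro x _
      rw [List.map_map]
      have hsp : ∀ cb : List String,
          pvA_splice (String.ofList [c] :: t.map (fun c => String.ofList [c]))
            (0 :: (pvWpos (t.map (fun c => String.ofList [c]))).map (· + 1)) (x :: cb)
          = x :: pvA_splice (t.map (fun c => String.ofList [c]))
              (pvWpos (t.map (fun c => String.ofList [c]))) cb := fun cb => pvSplice_zero _ _ _ _ _
      calc (pyProductRepeat cats (pvWpos (t.map (fun c => String.ofList [c]))).length).map
              ((fun comb => pvA_splice (String.ofList [c] :: t.map (fun c => String.ofList [c]))
                 (0 :: (pvWpos (t.map (fun c => String.ofList [c]))).map (· + 1)) comb) ∘ (x :: ·))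
          = (pyProductRepeat cats (pvWpos (t.map (fun c => String.ofList [c]))).length).map
              (fun cb => x :: pvA_splice (t.map (fun c => String.ofList [c]))
                 (pvWpos (t.map (fun c => String.ofList [c]))) cb) := by
            apply List.map_congr_left; intro cb _; exact hsp cb
        _ = ((pyProductRepeat cats (pvWpos (t.map (fun c => String.ofList [c]))).length).map
              (fun comb => pvA_splice (t.map (fun c => String.ofList [c]))
                 (pvWpos (t.map (fun c => String.ofList [c]))) comb)).map (x :: ·) := by
            rw [List.map_map]; rfl
        _ = (pvB_cart (t.map (fun c => if c == '*' then cats else [String.ofList [c]]))).map (x :: ·) := by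
            rw [ih]
    · have hc' : (c == '*') = false := by simpa using hc
      simp only [List.map_cons, pvWpos, pvKey, hc', Bool.false_eq_true, if_false, List.length_map,
        pvB_cart, List.flatMap_cons, List.flatMap_nil, List.append_nil]
      calc (pyProductRepeat cats (pvWpos (t.map (fun c => String.ofList [c]))).length).map
              (fun comb => pvA_splice (String.ofList [c] :: t.map (fun c => String.ofList [c]))
                 ((pvWpos (t.map (fun c => String.ofList [c]))).map (· + 1)) comb)
          = (pyProductRepeat cats (pvWpos (t.map (fun c => String.ofList [c]))).length).map
              (fun cb => String.ofList [c] :: pvA_splice (t.map (fun c => String.ofList [c]))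
                 (pvWpos (t.map (fun c => String.ofList [c]))) cb) := by
            apply List.map_congr_left; intro cb _; exact pvSplice_shift _ _ _ _
        _ = ((pyProductRepeat cats (pvWpos (t.map (fun c => String.ofList [c]))).length).map
              (fun comb => pvA_splice (t.map (fun c => String.ofList [c]))
                 (pvWpos (t.map (fun c => String.ofList [c]))) comb)).map (String.ofList [c] :: ·) := by
            rw [List.map_map]; rfl
        _ = (pvB_cart (t.map (fun c => if c == '*' then cats else [String.ofList [c]]))).map (String.ofList [c] :: ·) := by
            rw [ih]

-- A's stateful loop over the wildcard combinations is a map of the stateless splice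
theorem pvFold (nl0 : List String) (ps : List Nat)
    (hd : ∀ cb cb' : List String, cb.length = ps.length → cb'.length = ps.length →
      pvA_splice (pvA_splice nl0 ps cb) ps cb' = pvA_splice nl0 ps cb') :
    ∀ (combs : List (List String)) (x : List String) (acc : List (List String)),
    (∀ cb : List String, cb.length = ps.length → pvA_splice x ps cb = pvA_splice nl0 ps cb) →
    (∀ cb ∈ combs, cb.length = ps.length) →
    (combs.foldl (fun (st : List String × List (List String)) comb =>
        (pvA_splice st.1 ps comb, st.2 ++ [pvA_splice st.1 ps comb])) (x, acc)).2
      = acc ++ combs.map (fun cb => pvA_splice nl0 ps cb) := by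
  intro combs
  induction combs with
  | nil => intro x acc _ _; simp
  | cons cb rest ih =>
    intro x acc hH hlen
    simp only [List.foldl_cons, List.map_cons]
    rw [hH cb (hlen cb (by simp))]
    rw [ih (pvA_splice nl0 ps cb) (acc ++ [pvA_splice nl0 ps cb])
        (fun cb' h' => hd cb cb' (hlen cb (by simp)) h')
        (fun c hc => hlen c (by simp [hc]))]
    simp

theorem pvL1_eq (n : Nat) :
    (PySem.List.pyRange 0 (n : Int) 1).foldl (fun acc i => acc ++ [i + 2]) ([] : List Int)
      = (List.range n).map (fun i : Nat => (i : Int) + 2) := by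
  rw [PySem.List.foldl_append_singleton_eq_map, PySem.List.pyRange_one]
  have h1 : ((n : Int) - 0).toNat = n := by omega
  rw [h1, List.map_map, List.nil_append]
  apply List.map_congr_left; intro a _; simp

theorem pvFallback_eq (m : Nat) :
    (PySem.List.pyRange 0 ((m : Int) - 1) 1).map (fun _ => (2 : Int))
      = List.replicate (m - 1) (2 : Int) := by
  rw [PySem.List.pyRange_one, List.map_map]
  have h1 : ((m : Int) - 1 - 0).toNat = m - 1 := by omega
  rw [h1]
  simp [Function.comp_def, List.map_const']

-- ===== VERDICT (by name: the statement is the Claim_ definition above) =====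
theorem nodes_and_edges_from_string_spec : Claim_equal_nodes_and_edges_from_string := by
  intro graph_str edge_thresholds residue_categories _ _
  unfold Spec_nodes_and_edges_from_string
  unfold nodes_and_edges_from_string nodes_and_edges_from_string_alt
  set chars := PySem.Chars.replace graph_str.toList [' '] [] with hchars
  set nl0 := chars.map (fun c => String.ofList [c]) with hnl0
  have hnl : pvA_whileNodes chars 0 = nl0 := by rw [pvA_whileNodes_eq]; simp [hnl0]
  have hind : ((PySem.List.enumerate nl0 (0 : Int)).filter (fun p => p.2 == "*")).map
      (fun p => p.1.toNat) = pvWpos nl0 := by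
    have h0 := pvIndices_eq nl0 0
    simpa using h0
  simp only []
  rw [hnl, hind]
  have hlen0 : nl0.length = chars.length := by simp [hnl0]
  -- node components agree
  have hnode : (if (pvWpos nl0).length = 0 then [nl0]
      else ((pyProductRepeat residue_categories (pvWpos nl0).length).foldl
        (fun (st : List String × List (List String)) comb =>
          (pvA_splice st.1 (pvWpos nl0) comb, st.2 ++ [pvA_splice st.1 (pvWpos nl0) comb]))
        (nl0, [])).2)
      = pvB_cart (chars.map (fun c => if c == '*' then residue_categories else [String.ofList [c]])) := by
    by_cases hz : (pvWpos nl0).length = 0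
    · rw [if_pos hz]
      have := pvMain residue_categories chars
      rw [← hnl0] at this
      rw [hz] at this
      have hempty : pvWpos nl0 = [] := List.length_eq_zero_iff.mp hz
      simp only [pyProductRepeat, List.map_cons, List.map_nil, hempty, pvSplice_nil] at this
      exact this
    · rw [if_neg hz]
      rw [pvFold nl0 (pvWpos nl0)
        (fun cb cb' h h' => pvSplice_double nl0 nl0 cb cb' rfl h h')
        (pyProductRepeat residue_categories (pvWpos nl0).length) nl0 []
        (fun cb _ => rfl)
        (pvProdRepeat_length residue_categories (pvWpos nl0).length)]
      rw [List.nil_append]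
      have := pvMain residue_categories chars
      rw [← hnl0] at this
      exact this
  -- edge components agree
  have hl1 : (PySem.List.pyRange 0 (edge_thresholds.length : Int) 1).foldl
      (fun acc i => acc ++ [i + 2]) ([] : List Int)
      = (List.range edge_thresholds.length).map (fun i : Nat => (i : Int) + 2) :=
    pvL1_eq edge_thresholds.length
  have hedge : (if (pyProductRepeat ((PySem.List.pyRange 0 (edge_thresholds.length : Int) 1).foldl
        (fun acc i => acc ++ [i + 2]) ([] : List Int)) (nl0.length - 1)).length = 0 then
        [(PySem.List.pyRange 0 ((chars.length : Int) - 1) 1).map (fun _ => (2 : Int))]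
      else pyProductRepeat ((PySem.List.pyRange 0 (edge_thresholds.length : Int) 1).foldl
        (fun acc i => acc ++ [i + 2]) ([] : List Int)) (nl0.length - 1))
      = (if (pyProductRepeat ((List.range edge_thresholds.length).map (fun i : Nat => (i : Int) + 2))
          (chars.length - 1)).isEmpty then [List.replicate (chars.length - 1) (2 : Int)]
        else pyProductRepeat ((List.range edge_thresholds.length).map (fun i : Nat => (i : Int) + 2))
          (chars.length - 1)) := by
    rw [hl1, hlen0, pvFallback_eq chars.length]
    simp [List.isEmpty_iff, List.length_eq_zero_iff]
  exact Prod.ext (by rw [← hnode]) (by rw [← hedge])
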